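-- pv_equiv track=rewrite | github.com/lisongwei15931/stars | stars/apps/customer/assets/utils.py | mask_bank_card_no
-- ===== SOURCE A (Python) =====
-- def mask_bank_card_no(no):
--     if no:
--         s = '*'*(len(no)-4) + no[-4:]
--         r = s[:4] + ' '
--         for i in range(1, (len(no)+3)//4):
--             r += s[4*i:4*(i+1)] + ' '
--         return r
--     return no
-- ===== SOURCE B (Python) =====
-- def mask_bank_card_no(no):
--     if not no:
--         return no
--     masked = '*' * (len(no) - 4) + no[-4:]
--     groups = []
--     while masked:
--         groups.append(masked[:4])
--         masked = masked[4:]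
--     return ' '.join(groups) + ' '
-- ===== Notes on version B (the rewrite author's own statement) =====
-- stated objective: simpler
-- what changed: Replaces A's index-arithmetic loop (range over (len+3)//4 with s[4*i:4*(i+1)] slices) by consuming the masked string from the front four characters at a time and joining the collected groups with spaces.
import Mathlib
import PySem

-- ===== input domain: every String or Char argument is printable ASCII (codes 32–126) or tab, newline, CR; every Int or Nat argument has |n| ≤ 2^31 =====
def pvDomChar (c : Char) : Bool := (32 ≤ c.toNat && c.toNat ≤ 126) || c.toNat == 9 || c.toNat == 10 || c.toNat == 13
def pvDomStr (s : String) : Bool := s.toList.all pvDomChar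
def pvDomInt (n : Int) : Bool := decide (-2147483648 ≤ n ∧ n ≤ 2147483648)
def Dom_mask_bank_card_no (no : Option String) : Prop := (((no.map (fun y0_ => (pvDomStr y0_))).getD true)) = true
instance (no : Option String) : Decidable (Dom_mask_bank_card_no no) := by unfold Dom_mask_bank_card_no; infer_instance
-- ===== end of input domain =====

-- B replaces A's index-arithmetic slicing loop with front-consumption into 4-char groups joined by spaces (simpler).

-- ===== PORT A =====
-- literal transliteration of A: s = '*'*(len(no)-4) + no[-4:]; r = s[:4]+' '; for i in range(1,(len+3)//4): r += s[4i:4(i+1)]+' '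
def mask_bank_card_no (no : Option String) : Option String :=
  match no with
  | none => none
  | some n =>
    let cs := n.toList
    if cs.length ≠ 0 then
      let len : Int := cs.length
      let s : List Char := List.replicate (len - 4).toNat '*' ++ PySem.List.slice cs (some (-4)) none
      let r0 : List Char := PySem.List.slice s none (some 4) ++ [' ']
      let r := (PySem.List.pyRange 1 (PySem.Int.floordiv (len + 3) 4) 1).foldl
                 (fun acc i => acc ++ (PySem.List.slice s (some (4*i)) (some (4*(i+1))) ++ [' '])) r0
      some (String.ofList r)
    else some n

-- ===== PORT B =====
-- 'while masked: groups.append(masked[:4]); masked = masked[4:]'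
def pvChunk4 : List Char → List (List Char)
  | [] => []
  | c :: rest => ((c :: rest).take 4) :: pvChunk4 ((c :: rest).drop 4)
termination_by l => l.length
decreasing_by simp

def mask_bank_card_no_alt (no : Option String) : Option String :=
  match no with
  | none => none
  | some n =>
    let cs := n.toList
    if cs.length ≠ 0 then
      let masked : List Char := List.replicate ((cs.length : Int) - 4).toNat '*' ++ PySem.List.slice cs (some (-4)) none
      some (String.ofList (List.intercalate [' '] (pvChunk4 masked) ++ [' ']))
    else some n

-- ===== PRECONDITION & SPEC =====
def Spec_mask_bank_card_no (no : Option String) (out : Option String) : Prop := out = mask_bank_card_no_alt no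
instance (no : Option String) (out : Option String) : Decidable (Spec_mask_bank_card_no no out) := by unfold Spec_mask_bank_card_no; infer_instance

-- ===== CLAIM (what is proved, stated in full; the proofs are below) =====
def Claim_equal_mask_bank_card_no : Prop := ∀ (no : Option String), Dom_mask_bank_card_no no → Spec_mask_bank_card_no no (mask_bank_card_no no)

-- ===== LEMMAS AND PROOFS =====

-- B's join-with-trailing-space is the flatten of groups each followed by a space
lemma intercalate_space (l : List (List Char)) (h : l ≠ []) :
    List.intercalate [' '] l ++ [' '] = (l.map (fun g => g ++ [' '])).flatten := by
  induction l with
  | nil => simp at h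
  | cons c cs ih =>
    cases cs with
    | nil => simp [List.intercalate]
    | cons d ds =>
      have := ih (by simp)
      simp only [List.map_cons, List.flatten_cons] at *
      rw [← this]
      simp [List.intercalate, List.intersperse]

-- A's loop, in Nat form, computes the flatten of pvChunk4's groups each followed by a space
lemma main_nat (s : List Char) : s ≠ [] →
    s.take 4 ++ [' '] ++
      ((List.range ((s.length + 3) / 4 - 1)).flatMap
        (fun k => (s.drop (4 * (k + 1))).take 4 ++ [' ']))
    = ((pvChunk4 s).map (fun g => g ++ [' '])).flatten := by
  fun_induction pvChunk4 s with
  | case1 => intro h; simp at h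
  | case2 c rest ih =>
    intro _
    by_cases hlen : rest.length ≤ 3
    · have hdrop : (c :: rest).drop 4 = [] := by
        apply List.drop_eq_nil_of_le; simp; omega
      have hcnt : ((c :: rest).length + 3) / 4 - 1 = 0 := by simp; omega
      rw [hcnt, hdrop] at *
      simp [pvChunk4]
    · rw [Nat.not_le] at hlen
      have hne : (c :: rest).drop 4 ≠ [] := by simp; omega
      have hn : ((c :: rest).length + 3) / 4 - 1
          = (((c :: rest).drop 4).length + 3) / 4 - 1 + 1 := by simp; omega
      rw [hn, List.range_succ_eq_map]
      have IH := ih hne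
      simp only [List.flatMap_cons, List.flatMap_map]
      have hshift : ∀ k : ℕ, List.drop (4 * (k.succ + 1)) (c :: rest)
          = List.drop (4 * (k + 1)) (List.drop 4 (c :: rest)) := by
        intro k
        rw [List.drop_drop]
        congr 1
        omega
      simp only [hshift]
      rw [List.map_cons, List.flatten_cons, ← IH]


-- ===== VERDICT =====
theorem mask_bank_card_no_spec : Claim_equal_mask_bank_card_no := by
  unfold Claim_equal_mask_bank_card_no
  intro no _
  unfold Spec_mask_bank_card_no mask_bank_card_no mask_bank_card_no_alt
  match no with
  | none => rfl
  | some n =>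
    simp only
    by_cases hnil : n.toList.length = 0
    · simp [hnil]
    · simp only [hnil, if_pos, ne_eq, not_false_iff]
      set s : List Char := List.replicate ((n.toList.length : Int) - 4).toNat '*' ++ PySem.List.slice n.toList (some (-4)) none with hs
      have hslen : s.length = n.toList.length := by
        rw [hs, List.length_append, List.length_replicate,
            PySem.List.slice_from_neg_ofNat n.toList 4 (by norm_num), List.length_drop]
        omega
      have hsne : s ≠ [] := by
        intro h
        apply hnil
        rw [← hslen, h]
        rfl
      have hch : pvChunk4 s ≠ [] := by
        cases hcs : s with
        | nil => exact absurd hcs hsne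
        | cons a l => rw [pvChunk4]; simp
      have hfd : PySem.Int.floordiv ((n.toList.length : Int) + 3) 4 = (((n.toList.length + 3) / 4 : ℕ) : Int) := by
        have : ((n.toList.length : Int) + 3) = ((n.toList.length + 3 : ℕ) : Int) := by push_cast; ring
        rw [this]
        exact_mod_cast PySem.Int.floordiv_natCast (n.toList.length + 3) 4
      congr 2
      rw [intercalate_space _ hch, ← main_nat s hsne]
      rw [PySem.List.foldl_append_eq_flatMap]
      rw [hfd, PySem.List.pyRange_one, List.flatMap_map]
      have hsl : ∀ k : ℕ, PySem.List.slice s (some (4 * (1 + (k:Int)))) (some (4 * ((1 + (k:Int)) + 1))) = (s.drop (4*(k+1))).take 4 := by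
        intro k
        have h1 : (4 : Int) * (1 + (k:Int)) = ((4*(k+1) : ℕ) : Int) := by push_cast; ring
        have h2 : (4 : Int) * ((1 + (k:Int)) + 1) = ((4*(k+1) : ℕ) : Int) + ((4:ℕ) : Int) := by push_cast; ring
        rw [h1, h2, PySem.List.slice_natCast_add]
      simp only [hsl]
      have hcnt : ((((n.toList.length + 3) / 4 : ℕ) : Int) - 1).toNat = (s.length + 3) / 4 - 1 := by
        rw [hslen]
        omega
      rw [hcnt]
      have hto : PySem.List.slice s none (some 4) = s.take 4 := by
        rw [PySem.List.slice_to s (by norm_num : (0:Int) ≤ 4)]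
        rfl
      rw [hto, List.append_assoc]
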